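-- pv_equiv track=rewrite | github.com/Marianito412/TListasIter | TListasIterativas.py | alternada
-- ===== SOURCE A (Python) =====
-- def alternada(pLista):
--     """
--     Funcionalidad: Verifica que los enteros de una lista alterne entre pares e impares
--     Entradas:
--     -pLista(list): Lista a verificar
--     Salidas:
--     -return(bool): True si pLista se apega al patrón descrito
--     """
--     par = pLista[0] %2 == 0
--     for i in pLista:
--         if par and i%2!=0: #Si se necesita que sea par y no lo es
--             return False
--         if not par and i%2==0: #Si se necesita que sea impar y no lo es
--             return False
--         par = not par
--     return True
-- ===== SOURCE B (Python) =====
-- def alternada(pLista):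
--     return all(a % 2 != b % 2 for a, b in zip(pLista, pLista[1:]))
-- ===== Notes on version B (the rewrite author's own statement) =====
-- stated objective: idiomatic
-- what changed: Replaces the toggling 'par' state machine (seeded from the first element's parity) with a stateless adjacency check: every consecutive pair must have opposite parity.
import Mathlib
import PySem

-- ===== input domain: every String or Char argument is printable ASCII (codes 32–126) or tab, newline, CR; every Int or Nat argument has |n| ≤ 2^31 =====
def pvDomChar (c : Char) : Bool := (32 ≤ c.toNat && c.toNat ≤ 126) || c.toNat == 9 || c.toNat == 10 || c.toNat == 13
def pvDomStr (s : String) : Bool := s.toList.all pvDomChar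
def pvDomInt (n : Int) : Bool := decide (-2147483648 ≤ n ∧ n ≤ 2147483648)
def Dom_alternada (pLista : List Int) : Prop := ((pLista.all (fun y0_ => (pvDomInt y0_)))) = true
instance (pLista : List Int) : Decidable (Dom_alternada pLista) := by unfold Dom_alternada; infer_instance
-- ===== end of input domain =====

-- B drops A's toggling 'par' state variable for a stateless adjacent-pair parity check (idiomatic rewrite; same O(n) cost).


-- ===== PORT A =====
-- the 'for i in pLista' loop with the toggling 'par' accumulator
def alternadaLoop : List Int → Bool → Bool
  | [], _ => true
  | i :: rest, par =>
    if par && decide (PySem.Int.mod i 2 ≠ 0) then false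
    else if !par && decide (PySem.Int.mod i 2 = 0) then false
    else alternadaLoop rest (!par)

def alternada (pLista : List Int) : Bool :=
  match PySem.List.pyGet? pLista 0 with
  | none => false   -- the first-element read raises IndexError; excluded by Pre_alternada
  | some h => alternadaLoop pLista (decide (PySem.Int.mod h 2 = 0))

-- ===== PORT B =====
def alternada_alt (pLista : List Int) : Bool :=
  (List.zip pLista (PySem.List.slice pLista (some 1) none)).all
    (fun p => decide (PySem.Int.mod p.1 2 ≠ PySem.Int.mod p.2 2))

-- ===== PRECONDITION & SPEC =====
-- Pre_ excludes only the empty list, on which A raises IndexError reading the first element.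
def Pre_alternada (pLista : List Int) : Prop := pLista ≠ []
instance (pLista : List Int) : Decidable (Pre_alternada pLista) := by unfold Pre_alternada; infer_instance
def pvWitness_alternada : List Int := [2, 3, 4]

def Spec_alternada (pLista : List Int) (out : Bool) : Prop := out = alternada_alt pLista
instance (pLista : List Int) (out : Bool) : Decidable (Spec_alternada pLista out) := by unfold Spec_alternada; infer_instance

-- ===== CLAIM (what is proved, stated in full; the proofs are below) =====
def Claim_equal_alternada : Prop := ∀ (pLista : List Int), Dom_alternada pLista → Pre_alternada pLista → Spec_alternada pLista (alternada pLista)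

-- ===== LEMMAS AND PROOFS =====

-- structurally recursive adjacency check, bridge between the two ports
def adjAll : List Int → Bool
  | x :: y :: r => decide (PySem.Int.mod x 2 ≠ PySem.Int.mod y 2) && adjAll (y :: r)
  | _ => true

lemma mod2 (x : Int) : PySem.Int.mod x 2 = x % 2 :=
  PySem.Int.mod_eq_emod_of_pos (by norm_num)

lemma alt_eq_adjAll : ∀ (l : List Int), alternada_alt l = adjAll l := by
  intro l
  unfold alternada_alt
  rw [PySem.List.slice_from_one]
  induction l with
  | nil => simp [adjAll]
  | cons x xs ih =>
    cases xs with
    | nil => simp [adjAll]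
    | cons y r =>
      simp only [List.tail_cons, List.zip_cons_cons, List.all_cons] at *
      rw [ih]
      simp [adjAll]

lemma loop_eq_adjAll : ∀ (xs : List Int) (x : Int),
    alternadaLoop (x :: xs) (decide (PySem.Int.mod x 2 = 0)) = adjAll (x :: xs) := by
  intro xs
  induction xs with
  | nil =>
    intro x
    rcases Int.emod_two_eq x with h | h <;>
      simp only [alternadaLoop, adjAll, mod2, h] <;> simp
  | cons y r ih =>
    intro x
    have ih' := ih y
    rcases Int.emod_two_eq x with hx | hx <;> rcases Int.emod_two_eq y with hy | hy <;>
      simp only [alternadaLoop, adjAll, mod2, hx, hy] at * <;>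
      simp_all

-- ===== VERDICT (by name: the statement is the Claim_ definition above) =====
theorem alternada_spec : Claim_equal_alternada := by
  intro l _ hpre
  unfold Spec_alternada
  cases l with
  | nil => exact absurd rfl hpre
  | cons x xs =>
    unfold alternada
    rw [PySem.List.pyGet?_zero_cons]
    show alternadaLoop (x :: xs) (decide (PySem.Int.mod x 2 = 0)) = alternada_alt (x :: xs)
    rw [loop_eq_adjAll, alt_eq_adjAll]
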